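-- pv_equiv track=rewrite | github.com/IlIlllllIIIIl/BPS-spectra | nondeg.py | s4N
-- ===== SOURCE A (Python) =====
-- def s4N(ranges):
--     sol = []
--
--     for a1 in ranges[0]:
--         for a2 in ranges[1]:
--             for a3 in ranges[2]:
--                 if a2 < a3:
--                     continue
--                 for a4 in ranges[3]:
--                     if  a3 >= a4 and -a2 * a3 - a2 * a4 - a3 * a4 + a1 * a2 * a3 * a4 == -1:
--                         sol.append((a1, a2, a3, a4))
--     return sol
-- ===== SOURCE B (Python) =====
-- def s4N(ranges):
--     r1, r2, r3, r4 = ranges[0], ranges[1], ranges[2], ranges[3]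
--     cnt = {}
--     for a4 in r4:
--         cnt[a4] = cnt.get(a4, 0) + 1
--     sol = []
--     for a1 in r1:
--         for a2 in r2:
--             for a3 in r3:
--                 if a2 < a3:
--                     continue
--                 # equation: -a2*a3 - a2*a4 - a3*a4 + a1*a2*a3*a4 == -1
--                 # is linear in a4:  c*a4 == d
--                 c = a1 * a2 * a3 - a2 - a3
--                 d = a2 * a3 - 1
--                 if c == 0:
--                     if d == 0:
--                         for a4 in r4:
--                             if a4 <= a3:
--                                 sol.append((a1, a2, a3, a4))
--                 else:
--                     if d % c == 0:
--                         a4 = d // c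
--                         if a4 <= a3:
--                             sol.extend([(a1, a2, a3, a4)] * cnt.get(a4, 0))
--     return sol
-- ===== Notes on version B (the rewrite author's own statement) =====
-- stated objective: faster
-- what changed: The equation is linear in a4, so B solves c*a4 = d in closed form per (a1,a2,a3) and appends the solution with its multiplicity from a precomputed count of ranges[3], instead of scanning ranges[3] in a fourth nested loop.
-- outside the precondition, e.g. on s4N([[], [], []]): A returns [], B raises IndexError
import Mathlib
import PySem

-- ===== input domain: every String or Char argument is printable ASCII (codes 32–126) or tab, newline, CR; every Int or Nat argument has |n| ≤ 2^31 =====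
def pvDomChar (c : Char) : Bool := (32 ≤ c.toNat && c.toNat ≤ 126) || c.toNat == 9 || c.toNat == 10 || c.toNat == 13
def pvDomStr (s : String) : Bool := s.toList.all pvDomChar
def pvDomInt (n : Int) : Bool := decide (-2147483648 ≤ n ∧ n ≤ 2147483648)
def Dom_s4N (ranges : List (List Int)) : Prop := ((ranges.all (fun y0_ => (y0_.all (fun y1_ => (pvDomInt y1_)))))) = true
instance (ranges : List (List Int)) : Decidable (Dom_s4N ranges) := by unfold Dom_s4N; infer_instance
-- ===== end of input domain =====

-- B solves the equation, which is linear in a4, in closed form per (a1,a2,a3) instead of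
-- scanning ranges[3]; same return value (tuples ported as 4-element lists).

-- ===== PORT A =====
def s4N (ranges : List (List Int)) : List (List Int) :=
  ((PySem.List.pyGet? ranges 0).getD []).foldl (fun sol a1 =>
    ((PySem.List.pyGet? ranges 1).getD []).foldl (fun sol a2 =>
      ((PySem.List.pyGet? ranges 2).getD []).foldl (fun sol a3 =>
        if a2 < a3 then sol
        else
          ((PySem.List.pyGet? ranges 3).getD []).foldl (fun sol a4 =>
            if a3 ≥ a4 ∧ -a2 * a3 - a2 * a4 - a3 * a4 + a1 * a2 * a3 * a4 = -1 then
              sol ++ [[a1, a2, a3, a4]]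
            else sol) sol) sol) sol) []

-- ===== PORT B =====
def s4N_alt (ranges : List (List Int)) : List (List Int) :=
  let r1 := (PySem.List.pyGet? ranges 0).getD []
  let r2 := (PySem.List.pyGet? ranges 1).getD []
  let r3 := (PySem.List.pyGet? ranges 2).getD []
  let r4 := (PySem.List.pyGet? ranges 3).getD []
  let cnt := r4.foldl (fun d a4 => d.insert a4 (d.getD a4 0 + 1)) PySem.Dict.empty
  r1.foldl (fun sol a1 =>
    r2.foldl (fun sol a2 =>
      r3.foldl (fun sol a3 =>
        if a2 < a3 then sol
        else
          let c := a1 * a2 * a3 - a2 - a3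
          let d := a2 * a3 - 1
          if c = 0 then
            (if d = 0 then
              r4.foldl (fun sol a4 => if a4 ≤ a3 then sol ++ [[a1, a2, a3, a4]] else sol) sol
            else sol)
          else
            (if PySem.Int.mod d c = 0 then
              (let a4 := PySem.Int.floordiv d c
               if a4 ≤ a3 then
                 sol ++ PySem.List.pyRepeat [[a1, a2, a3, a4]] (cnt.getD a4 0)
               else sol)
            else sol)) sol) sol) []

-- ===== PRECONDITION & SPEC =====
-- Pre_ excludes inputs with fewer than 4 ranges: A raises IndexError on them except when an
-- earlier range is empty (then A returns []); B indexes ranges[3] up front and raises there too.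
def Pre_s4N (ranges : List (List Int)) : Prop := 4 ≤ ranges.length
instance (ranges : List (List Int)) : Decidable (Pre_s4N ranges) := by unfold Pre_s4N; infer_instance
def pvWitness_s4N : List (List Int) := [[2], [1], [1], [1]]
def Spec_s4N (ranges : List (List Int)) (out : List (List Int)) : Prop := out = s4N_alt ranges
instance (ranges : List (List Int)) (out : List (List Int)) : Decidable (Spec_s4N ranges out) := by unfold Spec_s4N; infer_instance

-- ===== CLAIM (what is proved, stated in full; the proofs are below) =====
def Claim_equal_s4N : Prop := ∀ (ranges : List (List Int)), Dom_s4N ranges → Pre_s4N ranges → Spec_s4N ranges (s4N ranges)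

-- ===== LEMMAS AND PROOFS =====

-- the equation of A is linear in a4: it holds iff c * a4 = d
lemma eq_iff_linear (a1 a2 a3 a4 : Int) :
    (-a2 * a3 - a2 * a4 - a3 * a4 + a1 * a2 * a3 * a4 = -1) ↔
      (a1 * a2 * a3 - a2 - a3) * a4 = a2 * a3 - 1 := by
  constructor <;> intro h <;> linear_combination h

lemma filter_eq_map_const_eq_replicate {α : Type} (l : List Int) (q : Int) (f : Int → α) :
    (l.filter (fun x => x = q)).map f = List.replicate (l.count q) (f q) := by
  induction l with
  | nil => simp
  | cons x t ih =>
    by_cases hx : x = q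
    · subst hx; simp [ih, List.replicate_succ]
    · simp [hx, ih]

-- the inner loop of A equals the closed-form branch of B, for every accumulator
lemma inner_eq (r4 : List Int) (a1 a2 a3 : Int) (sol : List (List Int)) :
    r4.foldl (fun sol a4 =>
        if a3 ≥ a4 ∧ -a2 * a3 - a2 * a4 - a3 * a4 + a1 * a2 * a3 * a4 = -1 then
          sol ++ [[a1, a2, a3, a4]]
        else sol) sol
    = (let c := a1 * a2 * a3 - a2 - a3
       let d := a2 * a3 - 1
       if c = 0 then
         (if d = 0 then
           r4.foldl (fun sol a4 => if a4 ≤ a3 then sol ++ [[a1, a2, a3, a4]] else sol) sol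
         else sol)
       else
         (if PySem.Int.mod d c = 0 then
           (let a4 := PySem.Int.floordiv d c
            if a4 ≤ a3 then
              sol ++ PySem.List.pyRepeat [[a1, a2, a3, a4]]
                ((r4.foldl (fun d a4 => d.insert a4 (d.getD a4 0 + 1)) PySem.Dict.empty).getD a4 0)
            else sol)
         else sol)) := by
  set c := a1 * a2 * a3 - a2 - a3 with hc
  set d := a2 * a3 - 1 with hd
  rw [PySem.List.foldl_append_ite
    (p := fun a4 => a3 ≥ a4 ∧ -a2 * a3 - a2 * a4 - a3 * a4 + a1 * a2 * a3 * a4 = -1)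
    (f := fun a4 => [a1, a2, a3, a4])]
  by_cases hc0 : c = 0
  · simp only [hc0, if_pos]
    by_cases hd0 : d = 0
    · simp only [hd0, if_pos]
      rw [PySem.List.foldl_append_ite (p := fun a4 => a4 ≤ a3) (f := fun a4 => [a1, a2, a3, a4])]
      congr 2
      apply List.filter_congr
      intro x _
      have := eq_iff_linear a1 a2 a3 x
      rw [← hc, ← hd] at this
      simp only [decide_eq_decide]
      constructor
      · rintro ⟨h1, _⟩; exact h1
      · intro h1; exact ⟨h1, this.2 (by rw [hc0, hd0, zero_mul])⟩
    · simp only [hd0, if_false]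
      have : r4.filter (fun a4 => decide (a3 ≥ a4 ∧ -a2 * a3 - a2 * a4 - a3 * a4 + a1 * a2 * a3 * a4 = -1)) = [] := by
        apply List.filter_eq_nil_iff.mpr
        intro x _ hx
        simp only [decide_eq_true_eq] at hx
        have h2 := ((eq_iff_linear a1 a2 a3 x).1 hx.2)
        rw [← hc, ← hd, hc0, zero_mul] at h2
        exact hd0 h2.symm
      rw [this]; simp
  · simp only [hc0, if_false]
    rw [PySem.Dict.getD_foldl_insert_add_one, PySem.Dict.getD_empty, zero_add]
    by_cases hm : PySem.Int.mod d c = 0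
    · simp only [hm, if_pos]
      have hdvd : c ∣ d := (PySem.Int.mod_eq_zero_iff_dvd d c).1 hm
      have hqc : PySem.Int.floordiv d c * c = d := by
        have := PySem.Int.floordiv_mul_add_mod d c
        rw [hm, add_zero] at this; exact this
      set q := PySem.Int.floordiv d c with hq
      have hiff : ∀ x : Int, (a3 ≥ x ∧ -a2 * a3 - a2 * x - a3 * x + a1 * a2 * a3 * x = -1) ↔ (x ≤ a3 ∧ x = q) := by
        intro x
        have h1 := eq_iff_linear a1 a2 a3 x
        rw [← hc, ← hd] at h1
        constructor
        · rintro ⟨hle, heq⟩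
          refine ⟨hle, ?_⟩
          have hx : c * x = d := h1.1 heq
          have : c * x = c * q := by rw [hx, ← hqc]; ring
          exact mul_left_cancel₀ hc0 this
        · rintro ⟨hle, rfl⟩
          exact ⟨hle, h1.2 (by rw [mul_comm]; exact hqc)⟩
      by_cases hqa : q ≤ a3
      · simp only [hqa, if_pos]
        have : r4.filter (fun x => decide (a3 ≥ x ∧ -a2 * a3 - a2 * x - a3 * x + a1 * a2 * a3 * x = -1))
             = r4.filter (fun x => x = q) := by
          apply List.filter_congr
          intro x _
          simp only [decide_eq_decide]
          rw [hiff x]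
          constructor
          · rintro ⟨_, rfl⟩; rfl
          · rintro rfl; exact ⟨hqa, rfl⟩
        rw [this, filter_eq_map_const_eq_replicate r4 q (fun a4 => [a1, a2, a3, a4]),
            PySem.List.pyRepeat_singleton]
        simp
      · simp only [hqa, if_false]
        have : r4.filter (fun x => decide (a3 ≥ x ∧ -a2 * a3 - a2 * x - a3 * x + a1 * a2 * a3 * x = -1)) = [] := by
          apply List.filter_eq_nil_iff.mpr
          intro x _ hx
          simp only [decide_eq_true_eq] at hx
          rcases (hiff x).1 hx with ⟨hle, rfl⟩
          exact hqa hle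
        rw [this]; simp
    · simp only [hm, if_false]
      have : r4.filter (fun x => decide (a3 ≥ x ∧ -a2 * a3 - a2 * x - a3 * x + a1 * a2 * a3 * x = -1)) = [] := by
        apply List.filter_eq_nil_iff.mpr
        intro x _ hx
        simp only [decide_eq_true_eq] at hx
        have h1 := (eq_iff_linear a1 a2 a3 x).1 hx.2
        rw [← hc, ← hd] at h1
        exact hm ((PySem.Int.mod_eq_zero_iff_dvd d c).2 ⟨x, by rw [h1]⟩)
      rw [this]; simp

-- ===== VERDICT (by name: the statement is the Claim_ definition above) =====
theorem s4N_spec : Claim_equal_s4N := by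
  intro ranges _ _
  unfold Spec_s4N s4N s4N_alt
  apply PySem.List.foldl_congr_mem
  intro sol a1 _
  apply PySem.List.foldl_congr_mem
  intro sol a2 _
  apply PySem.List.foldl_congr_mem
  intro sol a3 _
  by_cases h23 : a2 < a3
  · simp only [h23, if_pos]
  · simp only [h23, if_false]
    exact inner_eq _ a1 a2 a3 sol
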